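-- pv_equiv track=rewrite | github.com/microsoft/conductor | src/conductor/config/validator.py | _enumerate_paths_to_end
-- ===== SOURCE A (Python) =====
-- _MAX_ENUMERATED_PATHS = 100
--
-- def _enumerate_paths_to_end(
--     start: str,
--     graph: dict[str, list[tuple[str, bool]]],
--     max_depth: int = 50,
-- ) -> list[list[str]]:
--     """Enumerate paths from start to $end via DFS, up to _MAX_ENUMERATED_PATHS.
--
--     Args:
--         start: Entry point node name.
--         graph: Adjacency list from _build_routing_graph.
--         max_depth: Maximum path depth (prevents infinite exploration).
--
--     Returns:
--         List of paths (up to _MAX_ENUMERATED_PATHS), where each path is a list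
--         of node names. If the graph has more paths than the cap, returns the
--         first ones found. Callers should treat results as best-effort for
--         highly branchy workflows.
--     """
--     paths: list[list[str]] = []
--
--     def dfs(current: str, path: list[str], visited: set[str]) -> None:
--         if len(paths) >= _MAX_ENUMERATED_PATHS or len(path) > max_depth:
--             return
--         if current == "$end":
--             paths.append(list(path))
--             return
--         if current not in graph or current in visited:
--             return
--         visited.add(current)
--         path.append(current)
--         for target, _ in graph[current]:
--             dfs(target, path, visited)
--         path.pop()
--         visited.discard(current)
--
--     dfs(start, [], set())
--     return paths
-- ===== SOURCE B (Python) =====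
-- _MAX_ENUMERATED_PATHS = 100
--
-- def _enumerate_paths_to_end(start, graph, max_depth=50):
--     """Iterative DFS over an explicit stack of (node, path) frames; cycle
--     detection by path membership; children pushed in reverse so pop order
--     matches the left-to-right recursive order."""
--     paths = []
--     stack = [(start, [])]
--     while stack and len(paths) < _MAX_ENUMERATED_PATHS:
--         current, path = stack.pop()
--         if len(path) > max_depth:
--             continue
--         if current == "$end":
--             paths.append(path)
--             continue
--         if current not in graph or current in path:
--             continue
--         for target, _ in reversed(graph[current]):
--             stack.append((target, path + [current]))
--     return paths
-- ===== Notes on version B (the rewrite author's own statement) =====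
-- stated objective: alternative
-- what changed: Replaced the recursive DFS with shared mutable path/visited state and a global cap check by an iterative worklist loop over an explicit stack of (node, path-snapshot) frames, pushing successors in reverse and using path membership for cycle detection.
import Mathlib
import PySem

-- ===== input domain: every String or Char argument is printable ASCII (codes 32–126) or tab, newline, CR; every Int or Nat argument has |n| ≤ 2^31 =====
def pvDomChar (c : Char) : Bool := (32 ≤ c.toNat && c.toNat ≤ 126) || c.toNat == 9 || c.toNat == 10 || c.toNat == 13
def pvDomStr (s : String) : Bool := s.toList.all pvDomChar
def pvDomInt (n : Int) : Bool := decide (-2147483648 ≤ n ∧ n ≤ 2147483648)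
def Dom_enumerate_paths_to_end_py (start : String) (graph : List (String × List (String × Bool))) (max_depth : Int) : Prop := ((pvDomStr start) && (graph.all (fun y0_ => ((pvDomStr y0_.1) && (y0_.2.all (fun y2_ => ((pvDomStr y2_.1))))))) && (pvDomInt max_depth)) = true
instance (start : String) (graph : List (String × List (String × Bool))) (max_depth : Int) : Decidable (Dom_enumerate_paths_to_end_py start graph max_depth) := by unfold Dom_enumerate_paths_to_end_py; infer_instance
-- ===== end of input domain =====

-- B replaces A's recursive DFS (shared mutable accumulator + backtracked visited set)
-- by an iterative worklist loop over an explicit stack of (node, path-snapshot) frames;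
-- objective: alternative decomposition, same asymptotic cost, return value only.

-- termination measure ingredient shared by both ports: number of graph keys not yet blocked
def pvLeft (graph : List (String × List (String × Bool))) (blocked : List String) : Nat :=
  ((PySem.Dict.ofList graph).keys.filter (fun k => decide (k ∉ blocked))).length

theorem pvLeft_lt (graph : List (String × List (String × Bool))) (b b' : List String) (c : String)
    (hmem : c ∈ (PySem.Dict.ofList graph).keys) (hc : c ∉ b) (hc' : c ∈ b')
    (hsub : ∀ x ∈ b, x ∈ b') : pvLeft graph b' < pvLeft graph b := by
  unfold pvLeft
  set l := (PySem.Dict.ofList graph).keys with hl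
  have hfil : l.filter (fun k => decide (k ∉ b')) =
      (l.filter (fun k => decide (k ∉ b))).filter (fun k => decide (k ∉ b')) := by
    rw [List.filter_filter]
    apply List.filter_congr
    intro x _
    by_cases hx : x ∈ b'
    · simp [hx]
    · have hxb : x ∉ b := fun hm => hx (hsub x hm)
      simp [hx, hxb]
  have hsl : (l.filter (fun k => decide (k ∉ b'))).Sublist (l.filter (fun k => decide (k ∉ b))) := by
    rw [hfil]; exact List.filter_sublist
  have hlen := hsl.length_le
  have hcmem : c ∈ l.filter (fun k => decide (k ∉ b)) := by
    simp [List.mem_filter, hmem, hc]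
  have hcnot : c ∉ l.filter (fun k => decide (k ∉ b')) := by
    simp [List.mem_filter, hc']
  rcases lt_or_eq_of_le hlen with h | h
  · exact h
  · exact absurd (hsl.eq_of_length h ▸ hcmem) hcnot

-- ===== PORT A =====
mutual
def enumerate_paths_to_end_py_dfs (graph : List (String × List (String × Bool))) (max_depth : Int)
    (current : String) (path : List String) (visited : PySem.Set String)
    (paths : List (List String)) : List (List String) :=
  if 100 ≤ paths.length ∨ max_depth < (path.length : Int) then paths
  else if current = "$end" then paths ++ [path]
  else match h : (PySem.Dict.ofList graph).get? current with
    | none => paths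
    | some adj =>
      if hv : PySem.Set.contains visited current then paths
      else enumerate_paths_to_end_py_loop graph max_depth (path ++ [current])
            (PySem.Set.add visited current) adj paths
termination_by (pvLeft graph visited, 0)
decreasing_by
  apply Prod.Lex.left
  apply pvLeft_lt graph visited (PySem.Set.add visited current) current
  · by_contra hn
    rw [← PySem.Dict.get?_eq_none_iff_not_mem_keys] at hn
    rw [hn] at h; exact Option.some_ne_none _ h.symm
  · intro hmem; exact hv (by simpa [PySem.Set.contains_iff] using hmem)
  · simp [PySem.Set.mem_add]
  · intro x hx; simp [PySem.Set.mem_add, hx]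

def enumerate_paths_to_end_py_loop (graph : List (String × List (String × Bool))) (max_depth : Int)
    (path : List String) (visited : PySem.Set String) (adj : List (String × Bool))
    (paths : List (List String)) : List (List String) :=
  match adj with
  | [] => paths
  | (t, _) :: rest =>
      enumerate_paths_to_end_py_loop graph max_depth path visited rest
        (enumerate_paths_to_end_py_dfs graph max_depth t path visited paths)
termination_by (pvLeft graph visited, adj.length)
decreasing_by
  · apply Prod.Lex.right; simp
  · apply Prod.Lex.right; simp
end

def enumerate_paths_to_end_py (start : String) (graph : List (String × List (String × Bool))) (max_depth : Int) : List (List String) :=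
  enumerate_paths_to_end_py_dfs graph max_depth start [] PySem.Set.empty []

-- ===== PORT B =====
-- base of the exponential stack measure: 2 + total adjacency size of the graph
def pvK (graph : List (String × List (String × Bool))) : Nat :=
  2 + ((PySem.Dict.ofList graph).items.map (fun p => p.2.length)).sum

-- measure of a worklist: each frame weighs K ^ (unblocked keys + 1)
def pvMu (graph : List (String × List (String × Bool))) (stack : List (String × List String)) : Nat :=
  (stack.map (fun f => pvK graph ^ (pvLeft graph f.2 + 1))).sum

theorem pvMu_cons (graph : List (String × List (String × Bool))) (c : String) (p : List String)
    (st : List (String × List String)) :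
    pvMu graph ((c, p) :: st) = pvK graph ^ (pvLeft graph p + 1) + pvMu graph st := by
  simp [pvMu]

theorem pvMu_tail_lt (graph : List (String × List (String × Bool))) (c : String) (p : List String)
    (st : List (String × List String)) : pvMu graph st < pvMu graph ((c, p) :: st) := by
  rw [pvMu_cons]
  have : 0 < pvK graph ^ (pvLeft graph p + 1) := Nat.pow_pos (by unfold pvK; omega)
  omega

theorem pvMu_push_lt (graph : List (String × List (String × Bool)))
    (current : String) (path : List String) (adj : List (String × Bool))
    (st : List (String × List String))
    (h : (PySem.Dict.ofList graph).get? current = some adj) (hp : current ∉ path) :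
    pvMu graph ((adj.map (fun tb => (tb.1, path ++ [current]))) ++ st)
      < pvMu graph ((current, path) :: st) := by
  have hmemk : current ∈ (PySem.Dict.ofList graph).keys := by
    by_contra hn
    rw [← PySem.Dict.get?_eq_none_iff_not_mem_keys] at hn
    rw [hn] at h; exact Option.some_ne_none _ h.symm
  have hLlt : pvLeft graph (path ++ [current]) < pvLeft graph path := by
    apply pvLeft_lt graph path (path ++ [current]) current hmemk hp
    · simp
    · intro x hx; simp [hx]
  have hadj : adj.length ≤ pvK graph - 2 := by
    have hitems := PySem.Dict.mem_items_of_get?_eq_some (PySem.Dict.ofList graph) h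
    have hmm : adj.length ∈ ((PySem.Dict.ofList graph).items.map (fun p => p.2.length)) :=
      List.mem_map.mpr ⟨(current, adj), hitems, rfl⟩
    have := List.single_le_sum (l := (PySem.Dict.ofList graph).items.map (fun p => p.2.length))
      (fun x _ => Nat.zero_le x) _ hmm
    unfold pvK; omega
  have hK2 : 2 ≤ pvK graph := by unfold pvK; omega
  rw [pvMu_cons]
  have hsum : pvMu graph ((adj.map (fun tb => (tb.1, path ++ [current]))) ++ st)
      = adj.length * pvK graph ^ (pvLeft graph (path ++ [current]) + 1) + pvMu graph st := by
    unfold pvMu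
    rw [List.map_append, List.sum_append, List.map_map]
    congr 1
    have hconst : (adj.map ((fun f => pvK graph ^ (pvLeft graph f.2 + 1)) ∘ (fun tb => (tb.1, path ++ [current]))))
        = adj.map (fun _ => pvK graph ^ (pvLeft graph (path ++ [current]) + 1)) := by
      apply List.map_congr_left; intro x _; rfl
    rw [hconst, List.map_const', List.sum_replicate, smul_eq_mul]
  rw [hsum]
  have hpowle : pvK graph ^ (pvLeft graph (path ++ [current]) + 1) ≤ pvK graph ^ (pvLeft graph path) :=
    Nat.pow_le_pow_right (by omega) (by omega)
  have hKLpos : 0 < pvK graph ^ (pvLeft graph path) := Nat.pow_pos (by omega)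
  have hlt : adj.length * pvK graph ^ (pvLeft graph (path ++ [current]) + 1)
      < pvK graph ^ (pvLeft graph path + 1) := by
    calc adj.length * pvK graph ^ (pvLeft graph (path ++ [current]) + 1)
        ≤ (pvK graph - 2) * pvK graph ^ (pvLeft graph path) := Nat.mul_le_mul hadj hpowle
      _ < pvK graph * pvK graph ^ (pvLeft graph path) :=
          Nat.mul_lt_mul_of_pos_right (by omega) hKLpos
      _ = pvK graph ^ (pvLeft graph path + 1) := by rw [Nat.pow_succ]; ring
  omega

def enumerate_paths_to_end_py_alt_loop (graph : List (String × List (String × Bool))) (max_depth : Int)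
    (stack : List (String × List String)) (paths : List (List String)) : List (List String) :=
  match stack with
  | [] => paths
  | (current, path) :: rest =>
    if 100 ≤ paths.length then paths
    else if max_depth < (path.length : Int) then
      enumerate_paths_to_end_py_alt_loop graph max_depth rest paths
    else if current = "$end" then
      enumerate_paths_to_end_py_alt_loop graph max_depth rest (paths ++ [path])
    else match h : (PySem.Dict.ofList graph).get? current with
      | none => enumerate_paths_to_end_py_alt_loop graph max_depth rest paths
      | some adj =>
        if hp : current ∈ path then enumerate_paths_to_end_py_alt_loop graph max_depth rest paths
        else
          -- Python pushes reversed(adj) onto the stack top-last; with the list head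
          -- as stack top this is exactly adj in order, prepended to the rest
          enumerate_paths_to_end_py_alt_loop graph max_depth
            ((adj.map (fun tb => (tb.1, path ++ [current]))) ++ rest) paths
termination_by pvMu graph stack
decreasing_by
  · exact pvMu_tail_lt graph current path rest
  · exact pvMu_tail_lt graph current path rest
  · exact pvMu_tail_lt graph current path rest
  · exact pvMu_tail_lt graph current path rest
  · exact pvMu_push_lt graph current path adj rest h hp

def enumerate_paths_to_end_py_alt (start : String) (graph : List (String × List (String × Bool))) (max_depth : Int) : List (List String) :=
  enumerate_paths_to_end_py_alt_loop graph max_depth [(start, [])] []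

-- ===== PRECONDITION & SPEC =====
def Spec_enumerate_paths_to_end_py (start : String) (graph : List (String × List (String × Bool))) (max_depth : Int) (out : List (List String)) : Prop := out = enumerate_paths_to_end_py_alt start graph max_depth
instance (start : String) (graph : List (String × List (String × Bool))) (max_depth : Int) (out : List (List String)) : Decidable (Spec_enumerate_paths_to_end_py start graph max_depth out) := by unfold Spec_enumerate_paths_to_end_py; infer_instance

-- ===== CLAIM (what is proved, stated in full; the proofs are below) =====
def Claim_equal_enumerate_paths_to_end_py : Prop := ∀ (start : String) (graph : List (String × List (String × Bool))) (max_depth : Int), Dom_enumerate_paths_to_end_py start graph max_depth → Spec_enumerate_paths_to_end_py start graph max_depth (enumerate_paths_to_end_py start graph max_depth)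

-- ===== LEMMAS AND PROOFS =====

theorem alt_loop_cap (graph : List (String × List (String × Bool))) (max_depth : Int)
    (stack : List (String × List String)) (paths : List (List String))
    (h : 100 ≤ paths.length) :
    enumerate_paths_to_end_py_alt_loop graph max_depth stack paths = paths := by
  cases stack with
  | nil => rw [enumerate_paths_to_end_py_alt_loop]
  | cons f rest =>
    obtain ⟨c, p⟩ := f
    rw [enumerate_paths_to_end_py_alt_loop]
    simp [h]

theorem frame_eq (graph : List (String × List (String × Bool))) (max_depth : Int) :
    ∀ (n : Nat) (current : String) (path : List String) (visited : PySem.Set String)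
      (stack : List (String × List String)) (paths : List (List String)),
      pvLeft graph visited ≤ n →
      (∀ x, PySem.Set.contains visited x = true ↔ x ∈ path) →
      enumerate_paths_to_end_py_alt_loop graph max_depth ((current, path) :: stack) paths
        = enumerate_paths_to_end_py_alt_loop graph max_depth stack
            (enumerate_paths_to_end_py_dfs graph max_depth current path visited paths) := by
  intro n
  induction n using Nat.strong_induction_on with
  | _ n IH =>
    intro current path visited stack paths hn hinv
    rw [enumerate_paths_to_end_py_alt_loop, enumerate_paths_to_end_py_dfs]
    by_cases hcap : 100 ≤ paths.length
    · simp [hcap, alt_loop_cap graph max_depth stack paths hcap]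
    · by_cases hdep : max_depth < (path.length : Int)
      · simp [hcap, hdep]
      · simp only [hcap, hdep, or_self, if_false]
        by_cases hend : current = "$end"
        · simp [hend]
        · simp only [hend, if_false]
          cases hget : (PySem.Dict.ofList graph).get? current with
          | none => simp
          | some adj =>
            simp only []
            by_cases hp : current ∈ path
            · have hv : PySem.Set.contains visited current = true := (hinv current).mpr hp
              have hvm : current ∈ visited := by rw [← PySem.Set.contains_iff]; exact hv
              simp [hp, hvm]
            · have hv : ¬ PySem.Set.contains visited current = true :=
                fun hc => hp ((hinv current).mp hc)
              simp only [hp, dif_neg, not_false_iff, hv]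
              have hmemk : current ∈ (PySem.Dict.ofList graph).keys := by
                by_contra hn'
                rw [← PySem.Dict.get?_eq_none_iff_not_mem_keys] at hn'
                rw [hn'] at hget; exact Option.some_ne_none _ hget.symm
              have hlt : pvLeft graph (PySem.Set.add visited current) < pvLeft graph visited := by
                apply pvLeft_lt graph visited _ current hmemk
                  (fun hmem => hv (by simpa [PySem.Set.contains_iff] using hmem))
                · simp [PySem.Set.mem_add]
                · intro x hx; rw [PySem.Set.mem_add]; exact Or.inl hx
              have hinv' : ∀ x, PySem.Set.contains (PySem.Set.add visited current) x = true
                  ↔ x ∈ path ++ [current] := by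
                intro x
                rw [PySem.Set.contains_iff, PySem.Set.mem_add, List.mem_append, List.mem_singleton]
                constructor
                · rintro (hx | hx)
                  · exact Or.inl ((hinv x).mp (by rw [PySem.Set.contains_iff]; exact hx))
                  · exact Or.inr hx
                · rintro (hx | hx)
                  · exact Or.inl (by have hc := (hinv x).mpr hx; rwa [PySem.Set.contains_iff] at hc)
                  · exact Or.inr hx
              have hloop : ∀ (l : List (String × Bool)) (st : List (String × List String))
                  (ps : List (List String)),
                  enumerate_paths_to_end_py_alt_loop graph max_depth
                      ((l.map (fun tb => (tb.1, path ++ [current]))) ++ st) ps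
                    = enumerate_paths_to_end_py_alt_loop graph max_depth st
                        (enumerate_paths_to_end_py_loop graph max_depth (path ++ [current])
                          (PySem.Set.add visited current) l ps) := by
                intro l
                induction l with
                | nil =>
                  intro st ps
                  rw [enumerate_paths_to_end_py_loop]
                  simp
                | cons hd tl ihl =>
                  intro st ps
                  obtain ⟨t, bb⟩ := hd
                  rw [enumerate_paths_to_end_py_loop]
                  simp only [List.map_cons, List.cons_append]
                  rw [IH (pvLeft graph (PySem.Set.add visited current)) (lt_of_lt_of_le hlt hn)
                    t (path ++ [current]) (PySem.Set.add visited current) _ ps le_rfl hinv']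
                  exact ihl _ _
              exact hloop adj stack paths

-- ===== VERDICT (by name: the statement is the Claim_ definition above) =====
theorem enumerate_paths_to_end_py_spec : Claim_equal_enumerate_paths_to_end_py := by
  intro start graph max_depth _
  unfold Spec_enumerate_paths_to_end_py enumerate_paths_to_end_py enumerate_paths_to_end_py_alt
  rw [frame_eq graph max_depth (pvLeft graph PySem.Set.empty) start [] PySem.Set.empty [] []
    le_rfl (by intro x; simp [PySem.Set.empty])]
  rw [enumerate_paths_to_end_py_alt_loop]
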